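-- pv_equiv track=rewrite | github.com/succdedf/real-time-PLKG-tool | oai_ue.py | Cascade_Com
-- ===== SOURCE A (Python) =====
-- def Cascade_Com(K1, K2, C1, C2, len):
--     R1 = 0
--     R2 = 0
--     new_len = len
--     mask = 7
--
--     Diff = C1 ^ C2
--     i = 0
--     while i < len:
--         if Diff & 1 == 0:
--             R1 = R1 | (K1 & mask)
--             R2 = R2 | (K2 & mask)
--             mask = mask << 3
--         else:
--             new_len -= 3
--             K1 = K1 >> 3
--             K2 = K2 >> 3
--         Diff = Diff >> 1
--         i += 3
--     return [R1, R2, new_len]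
-- ===== SOURCE B (Python) =====
-- def Cascade_Com(K1, K2, C1, C2, len):
--     Diff = C1 ^ C2
--     R1 = 0
--     R2 = 0
--     new_len = len
--     kept = 0
--     j = 0
--     while 3 * j < len:
--         if (Diff >> j) & 1 == 0:
--             R1 |= ((K1 >> (3 * j)) & 7) << (3 * kept)
--             R2 |= ((K2 >> (3 * j)) & 7) << (3 * kept)
--             kept += 1
--         else:
--             new_len -= 3
--         j += 1
--     return [R1, R2, new_len]
-- ===== Notes on version B (the rewrite author's own statement) =====
-- stated objective: simpler
-- what changed: B never mutates K1/K2 or a moving mask: it XORs once, then for each chunk index j extracts (K>>3j)&7 directly and places it with an explicit 'kept' write counter, replacing A's synced shift-the-key/shift-the-mask state machine.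
import Mathlib
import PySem

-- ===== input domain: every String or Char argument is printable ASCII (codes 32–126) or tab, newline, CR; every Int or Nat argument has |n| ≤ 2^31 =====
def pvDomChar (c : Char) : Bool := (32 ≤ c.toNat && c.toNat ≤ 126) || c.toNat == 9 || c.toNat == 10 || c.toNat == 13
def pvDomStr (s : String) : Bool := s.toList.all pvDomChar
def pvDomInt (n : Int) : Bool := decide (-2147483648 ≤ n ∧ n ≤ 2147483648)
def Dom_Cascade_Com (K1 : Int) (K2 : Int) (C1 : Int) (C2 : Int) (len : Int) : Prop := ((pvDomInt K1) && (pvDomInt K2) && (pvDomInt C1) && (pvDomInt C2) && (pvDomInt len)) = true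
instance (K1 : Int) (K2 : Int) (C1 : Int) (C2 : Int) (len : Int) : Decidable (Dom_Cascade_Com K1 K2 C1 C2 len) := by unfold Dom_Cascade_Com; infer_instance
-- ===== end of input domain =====

-- B replaces A's mutate-K1/K2-and-moving-mask state machine by direct indexed chunk
-- extraction ((K >> 3j) & 7) with an explicit 'kept' write counter (objective: simpler).

-- ===== PORT A =====
-- while i < len: test Diff&1; keep (OR K&mask into R, mask<<=3) or drop (K>>=3, new_len-=3); Diff>>=1; i+=3
-- fuel only makes the recursion structural: len.toNat ≥ the ceil(len/3) iterations, and at fuel 0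
-- the loop-exit value is returned, so the loop is exact.
def CascadeGoA (fuel : Nat) (len K1 K2 Diff R1 R2 mask new_len i : Int) : List Int :=
  match fuel with
  | 0 => [R1, R2, new_len]
  | fuel + 1 =>
    if i < len then
      if PySem.Int.band Diff 1 = 0 then
        CascadeGoA fuel len K1 K2 (Diff >>> (1:Nat))
          (PySem.Int.bor R1 (PySem.Int.band K1 mask))
          (PySem.Int.bor R2 (PySem.Int.band K2 mask))
          (mask <<< (3:Nat)) new_len (i + 3)
      else
        CascadeGoA fuel len (K1 >>> (3:Nat)) (K2 >>> (3:Nat)) (Diff >>> (1:Nat)) R1 R2 mask (new_len - 3) (i + 3)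
    else [R1, R2, new_len]

def Cascade_Com (K1 : Int) (K2 : Int) (C1 : Int) (C2 : Int) (len : Int) : List Int :=
  CascadeGoA len.toNat len K1 K2 (PySem.Int.bxor C1 C2) 0 0 7 len 0

-- ===== PORT B =====
-- while 3*j < len: test bit j of Diff; keep (extract (K>>3j)&7, place at 3*kept, kept+=1) or drop (new_len-=3); j+=1
def CascadeGoB (fuel : Nat) (len K1 K2 Diff R1 R2 new_len : Int) (j kept : Nat) : List Int :=
  match fuel with
  | 0 => [R1, R2, new_len]
  | fuel + 1 =>
    if 3 * (j : Int) < len then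
      if PySem.Int.band (Diff >>> j) 1 = 0 then
        CascadeGoB fuel len K1 K2 Diff
          (PySem.Int.bor R1 ((PySem.Int.band (K1 >>> (3 * j)) 7) <<< (3 * kept)))
          (PySem.Int.bor R2 ((PySem.Int.band (K2 >>> (3 * j)) 7) <<< (3 * kept)))
          new_len (j + 1) (kept + 1)
      else
        CascadeGoB fuel len K1 K2 Diff R1 R2 (new_len - 3) (j + 1) kept
    else [R1, R2, new_len]

def Cascade_Com_alt (K1 : Int) (K2 : Int) (C1 : Int) (C2 : Int) (len : Int) : List Int :=
  CascadeGoB len.toNat len K1 K2 (PySem.Int.bxor C1 C2) 0 0 len 0 0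

-- ===== PRECONDITION & SPEC =====
def Spec_Cascade_Com (K1 : Int) (K2 : Int) (C1 : Int) (C2 : Int) (len : Int) (out : List Int) : Prop := out = Cascade_Com_alt K1 K2 C1 C2 len
instance (K1 : Int) (K2 : Int) (C1 : Int) (C2 : Int) (len : Int) (out : List Int) : Decidable (Spec_Cascade_Com K1 K2 C1 C2 len out) := by unfold Spec_Cascade_Com; infer_instance

-- ===== CLAIM (what is proved, stated in full; the proofs are below) =====
def Claim_equal_Cascade_Com : Prop := ∀ (K1 : Int) (K2 : Int) (C1 : Int) (C2 : Int) (len : Int), Dom_Cascade_Com K1 K2 C1 C2 len → Spec_Cascade_Com K1 K2 C1 C2 len (Cascade_Com K1 K2 C1 C2 len)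

-- ===== LEMMAS AND PROOFS =====

theorem pvNatMask (a m : Nat) : a &&& (7 <<< m) = ((a >>> m) % 8) <<< m := by
  have h7 : (7:Nat) = 2^3 - 1 := rfl
  have h8 : (8:Nat) = 2^3 := rfl
  apply Nat.eq_of_testBit_eq
  intro i
  rw [h7, h8]
  simp only [Nat.testBit_and, Nat.testBit_shiftLeft, Nat.testBit_mod_two_pow,
    Nat.testBit_shiftRight, Nat.testBit_two_pow_sub_one]
  by_cases hm : m ≤ i
  · have hmi : m + (i - m) = i := by omega
    rw [hmi]
    by_cases h3 : i - m < 3 <;> simp [hm, h3]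
  · simp [hm]

theorem pvShiftRR (x : Int) (a b : Nat) : (x >>> a) >>> b = x >>> (a + b) := by
  simp only [Int.shiftRight_eq_div_pow, pow_add]
  push_cast
  rw [Int.ediv_ediv_of_nonneg (by positivity)]

theorem pvShiftLL (x : Int) (a b : Nat) : (x <<< a) <<< b = x <<< (a + b) := by
  simp only [Int.shiftLeft_eq, pow_add]
  ring

theorem pvEdivNeg (n m : Nat) : (-(n:Int) - 1) / ((2:Int)^m) = -((n / 2^m : Nat) : Int) - 1 := by
  have hP : (0:Int) < 2^m := by positivity
  have hr : n % 2^m < 2^m := Nat.mod_lt _ (by positivity)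
  have hn : n = 2^m * (n / 2^m) + n % 2^m := (Nat.div_add_mod n (2^m)).symm
  have hrw : -(n:Int) - 1 = ((2:Int)^m - 1 - (n % 2^m : Nat)) + (-((n / 2^m : Nat):Int) - 1) * 2^m := by
    push_cast
    nth_rewrite 1 [hn]
    push_cast
    ring
  rw [hrw, Int.add_mul_ediv_right _ _ (ne_of_gt hP),
    Int.ediv_eq_zero_of_lt (by push_cast; omega) (by push_cast; omega)]
  ring

theorem pvBandNeg (x b : Int) (hx : x < 0) (hb : 0 ≤ b) :
    PySem.Int.band x b = ((b.toNat - (b.toNat &&& (-x - 1).toNat) : Nat) : Int) := by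
  unfold PySem.Int.band
  rw [if_neg (by omega), if_pos hb]

-- Python:  x & (7 << m)  ==  ((x >> m) % 8) << m, for every Int x (both signs)
theorem pvIntMask (x : Int) (m : Nat) : PySem.Int.band x ((7:Int) <<< m) = ((x >>> m) % 8) <<< m := by
  have h7m : ((7:Int) <<< m) = (((7 <<< m : Nat)) : Int) := by
    rw [Int.natCast_shiftLeft]; norm_num
  by_cases hx : 0 ≤ x
  · rw [h7m, PySem.Int.band_of_nonneg hx (by positivity)]
    obtain ⟨a, rfl⟩ := Int.eq_ofNat_of_zero_le hx
    rw [Int.toNat_natCast, Int.toNat_natCast, pvNatMask]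
    push_cast [Int.natCast_shiftLeft, Int.natCast_shiftRight]
    ring_nf
  · have hx' : x < 0 := by omega
    have hb : (0:Int) ≤ ((7 <<< m : Nat) : Int) := by positivity
    rw [h7m, pvBandNeg x _ hx' hb, Int.toNat_natCast]
    set n := (-x - 1).toNat with hn
    have hxn : x = -(n:Int) - 1 := by simp [hn]; omega
    have hsr : x >>> m = -((n / 2^m : Nat) : Int) - 1 := by
      rw [Int.shiftRight_eq_div_pow, hxn]
      push_cast
      exact pvEdivNeg n m
    have hmod : (x >>> m) % 8 = 7 - ((n / 2^m : Nat) : Int) % 8 := by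
      rw [hsr]; omega
    have hq : ((n / 2^m : Nat) : Int) % 8 = ((n / 2^m % 8 : Nat) : Int) := by push_cast; ring
    rw [hmod, hq, Nat.and_comm, pvNatMask]
    have h8 : n / 2^m % 8 ≤ 7 := Nat.le_of_lt_succ (Nat.mod_lt _ (by norm_num))
    have hle : (n / 2^m % 8) * 2^m ≤ 7 * 2^m := Nat.mul_le_mul_right _ h8
    simp only [Nat.shiftRight_eq_div_pow, Nat.shiftLeft_eq, Int.shiftLeft_eq]
    rw [Nat.cast_sub hle]
    push_cast
    ring

-- Python:  x & 7  ==  x % 8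
theorem pvBand7 (x : Int) : PySem.Int.band x 7 = x % 8 := by
  have := pvIntMask x 0
  simpa [Int.shiftRight_zero, Int.shiftLeft_zero] using this

-- A's chunk read (shifted key, moving mask) equals B's chunk read (indexed extraction)
theorem pvChunk (x : Int) (d k : Nat) :
    PySem.Int.band (x >>> (3 * d)) ((7:Int) <<< (3 * k)) =
      (PySem.Int.band (x >>> (3 * d + 3 * k)) 7) <<< (3 * k) := by
  rw [pvIntMask, pvShiftRR, pvBand7]

-- loop invariant: A's state after j iterations with `kept` keeps is
--   K = K0 >>> 3*(j-kept), Diff = D0 >>> j, mask = 7 <<< 3*kept, i = 3*j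
theorem pvGoEq (fuel : Nat) : ∀ (len K1 K2 D R1 R2 nl : Int) (j kept : Nat), kept ≤ j →
    CascadeGoA fuel len (K1 >>> (3 * (j - kept))) (K2 >>> (3 * (j - kept))) (D >>> j)
        R1 R2 ((7:Int) <<< (3 * kept)) nl (3 * (j : Int))
      = CascadeGoB fuel len K1 K2 D R1 R2 nl j kept := by
  induction fuel with
  | zero => intro len K1 K2 D R1 R2 nl j kept _; rfl
  | succ fuel IH =>
    intro len K1 K2 D R1 R2 nl j kept hkj
    show (if 3 * (j:Int) < len then _ else _) = (if 3 * (j:Int) < len then _ else _)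
    by_cases hc : 3 * (j : Int) < len
    · rw [if_pos hc, if_pos hc]
      have hjsucc : (3 : Int) * (j : Int) + 3 = 3 * ((j + 1 : Nat) : Int) := by push_cast; ring
      by_cases hbit : PySem.Int.band (D >>> j) 1 = 0
      · rw [if_pos hbit, if_pos hbit]
        rw [pvChunk K1 (j - kept) kept, pvChunk K2 (j - kept) kept]
        have hd : 3 * (j - kept) + 3 * kept = 3 * j := by omega
        rw [hd, pvShiftRR, pvShiftLL, hjsucc]
        have h2 : 3 * kept + 3 = 3 * (kept + 1) := by omega
        have h3 : j - kept = (j + 1) - (kept + 1) := by omega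
        rw [h2, h3]
        exact IH len K1 K2 D _ _ nl (j+1) (kept+1) (by omega)
      · rw [if_neg hbit, if_neg hbit]
        rw [pvShiftRR K1, pvShiftRR K2, pvShiftRR D, hjsucc]
        have h3 : 3 * (j - kept) + 3 = 3 * ((j + 1) - kept) := by omega
        rw [h3]
        exact IH len K1 K2 D R1 R2 (nl - 3) (j+1) kept (by omega)
    · rw [if_neg hc, if_neg hc]

-- ===== VERDICT (by name: the statement is the Claim_ definition above) =====
theorem Cascade_Com_spec : Claim_equal_Cascade_Com := by
  intro K1 K2 C1 C2 len _
  unfold Spec_Cascade_Com Cascade_Com Cascade_Com_alt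
  have h := pvGoEq len.toNat len K1 K2 (PySem.Int.bxor C1 C2) 0 0 len 0 0 (le_refl 0)
  simpa [Int.shiftRight_zero, Int.shiftLeft_zero] using h
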